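-- pv_equiv track=rewrite | github.com/MaiPriyanshuHoooon/triageX | core/parsers.py | parse_sc_query_table
-- ===== SOURCE A (Python) =====
-- def escape_html(text):
--     """Escape special HTML characters"""
--     if not text:
--         return ""
--     return (str(text)
--             .replace("&", "&amp;")
--             .replace("<", "&lt;")
--             .replace(">", "&gt;")
--             .replace('"', "&quot;")
--             .replace("'", "&#x27;"))
--
-- def parse_sc_query_table(lines):
--     """Parse sc query output into table"""
--     html = '<table class="data-table">\n'
--     html += '  <thead>\n    <tr><th>Property</th><th>Value</th></tr>\n  </thead>\n'
--     html += '  <tbody>\n'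
--
--     current_service = ""
--
--     for line in lines:
--         line_stripped = line.strip()
--
--         if not line_stripped:
--             continue
--
--         # Service name (starts with SERVICE_NAME)
--         if line_stripped.startswith('SERVICE_NAME'):
--             if current_service:
--                 # Add separator between services
--                 html += '    <tr><td colspan="2">&nbsp;</td></tr>\n'
--             parts = line_stripped.split(':', 1)
--             current_service = parts[1].strip() if len(parts) > 1 else ''
--             html += f'    <tr class="section-header"><td colspan="2"><strong>Service: {escape_html(current_service)}</strong></td></tr>\n'
--         elif ':' in line_stripped:
--             # Property: value format
--             parts = line_stripped.split(':', 1)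
--             key = parts[0].strip()
--             value = parts[1].strip() if len(parts) > 1 else ''
--             html += f'    <tr><td style="padding-left: 20px;">{escape_html(key)}</td><td>{escape_html(value)}</td></tr>\n'
--
--     html += '  </tbody>\n</table>'
--     return html
-- ===== SOURCE B (Python) =====
-- _HEADER = ('<table class="data-table">\n'
--            '  <thead>\n    <tr><th>Property</th><th>Value</th></tr>\n  </thead>\n'
--            '  <tbody>\n')
-- _FOOTER = '  </tbody>\n</table>'
--
--
-- def _esc_char(c):
--     if c == '&':
--         return '&amp;'
--     if c == '<':
--         return '&lt;'
--     if c == '>':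
--         return '&gt;'
--     if c == '"':
--         return '&quot;'
--     if c == "'":
--         return '&#x27;'
--     return c
--
--
-- def _escape(text):
--     """Escape special HTML characters, one character at a time."""
--     return ''.join(_esc_char(c) for c in str(text))
--
--
-- def _parse_records(lines):
--     """First pass: turn the raw lines into structured records.
--
--     ('service', name, needs_separator) for SERVICE_NAME lines,
--     ('prop', key, value) for 'key: value' lines."""
--     records = []
--     current_service = ""
--     for line in lines:
--         s = line.strip()
--         if not s:
--             continue
--         if s.startswith('SERVICE_NAME'):
--             parts = s.split(':', 1)
--             name = parts[1].strip() if len(parts) > 1 else ''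
--             records.append(('service', name, bool(current_service)))
--             current_service = name
--         elif ':' in s:
--             parts = s.split(':', 1)
--             value = parts[1].strip() if len(parts) > 1 else ''
--             records.append(('prop', parts[0].strip(), value))
--     return records
--
--
-- def _render(rec):
--     """Second pass: one record -> its HTML row(s)."""
--     if rec[0] == 'service':
--         _, name, sep = rec
--         row = f'    <tr class="section-header"><td colspan="2"><strong>Service: {_escape(name)}</strong></td></tr>\n'
--         return ('    <tr><td colspan="2">&nbsp;</td></tr>\n' + row) if sep else row
--     _, key, value = rec
--     return f'    <tr><td style="padding-left: 20px;">{_escape(key)}</td><td>{_escape(value)}</td></tr>\n'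
--
--
-- def parse_sc_query_table(lines):
--     """Parse sc query output into table"""
--     return _HEADER + ''.join(_render(r) for r in _parse_records(lines)) + _FOOTER
-- ===== Notes on version B (the rewrite author's own statement) =====
-- stated objective: alternative
-- what changed: A interleaves parsing and HTML emission in one loop that grows a single html string via chained str.replace escaping; B first parses the lines into a list of structured records (service header with separator flag, or key/value property), then renders each record to its row string with a per-character escaper and joins them between the fixed header and footer.
import Mathlib
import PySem

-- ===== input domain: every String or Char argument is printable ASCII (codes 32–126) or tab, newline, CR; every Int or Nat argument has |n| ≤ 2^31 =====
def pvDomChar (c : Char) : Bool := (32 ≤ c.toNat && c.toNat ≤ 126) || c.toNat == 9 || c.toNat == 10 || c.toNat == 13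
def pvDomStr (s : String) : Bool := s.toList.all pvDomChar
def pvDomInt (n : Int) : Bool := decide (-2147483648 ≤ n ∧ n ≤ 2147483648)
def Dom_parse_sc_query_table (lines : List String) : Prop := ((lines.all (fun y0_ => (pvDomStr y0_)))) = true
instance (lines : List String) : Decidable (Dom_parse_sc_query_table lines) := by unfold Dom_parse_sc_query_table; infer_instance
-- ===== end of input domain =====

-- B restructures A's single accumulating loop into two passes (parse the lines to a structured
-- record list, then render each record and join), and escapes per character instead of by chained
-- whole-string replace; objective: alternative decomposition, same cost.

-- ===== PORT A =====
-- A's module helper escape_html (chained str.replace calls)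
def escape_html (text : String) : String :=
  if text = "" then ""   -- `if not text` on a string = empty check
  else PySem.Str.replace (PySem.Str.replace (PySem.Str.replace (PySem.Str.replace
        (PySem.Str.replace text "&" "&amp;") "<" "&lt;") ">" "&gt;") "\"" "&quot;") "'" "&#x27;"

-- loop body of A's `for line in lines`, state = (html, current_service)
def pvStepA (st : String × String) (line : String) : String × String :=
  let line_stripped := PySem.Str.strip line
  if line_stripped = "" then st
  else if PySem.Str.startswith line_stripped "SERVICE_NAME" then
    let html := if st.2 ≠ "" then st.1 ++ "    <tr><td colspan=\"2\">&nbsp;</td></tr>\n" else st.1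
    let parts := (PySem.Str.splitMax? line_stripped ":" 1).getD []   -- sep ":" ≠ "" so never none
    let current_service := if parts.length > 1 then PySem.Str.strip ((PySem.List.pyGet? parts 1).getD "") else ""
    (html ++ "    <tr class=\"section-header\"><td colspan=\"2\"><strong>Service: " ++ escape_html current_service ++ "</strong></td></tr>\n", current_service)
  else if PySem.Str.isIn ":" line_stripped then
    let parts := (PySem.Str.splitMax? line_stripped ":" 1).getD []
    let key := PySem.Str.strip ((PySem.List.pyGet? parts 0).getD "")   -- parts[0] always exists
    let value := if parts.length > 1 then PySem.Str.strip ((PySem.List.pyGet? parts 1).getD "") else ""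
    (st.1 ++ "    <tr><td style=\"padding-left: 20px;\">" ++ escape_html key ++ "</td><td>" ++ escape_html value ++ "</td></tr>\n", st.2)
  else st

def parse_sc_query_table (lines : List String) : String :=
  let html := "<table class=\"data-table\">\n"
  let html := html ++ "  <thead>\n    <tr><th>Property</th><th>Value</th></tr>\n  </thead>\n"
  let html := html ++ "  <tbody>\n"
  let st := lines.foldl pvStepA (html, "")
  st.1 ++ "  </tbody>\n</table>"

-- ===== PORT B =====
-- Source B's _esc_char: one character -> its escape
def pvEscChar (c : Char) : String :=
  if c = '&' then "&amp;"
  else if c = '<' then "&lt;"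
  else if c = '>' then "&gt;"
  else if c = '"' then "&quot;"
  else if c = '\'' then "&#x27;"
  else String.ofList [c]

-- Source B's _escape: ''.join(_esc_char(c) for c in text)
def pvEscape (text : String) : String := PySem.Str.join "" (text.toList.map pvEscChar)

inductive PvRec where
  | service : String → Bool → PvRec       -- ('service', name, needs_separator)
  | prop : String → String → PvRec        -- ('prop', key, value)
deriving DecidableEq, Repr

def pvHeader : String := "<table class=\"data-table\">\n  <thead>\n    <tr><th>Property</th><th>Value</th></tr>\n  </thead>\n  <tbody>\n"
def pvFooter : String := "  </tbody>\n</table>"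

-- loop body of Source B's _parse_records, state = (current_service, records)
def pvParseStep (st : String × List PvRec) (line : String) : String × List PvRec :=
  let s := PySem.Str.strip line
  if s = "" then st
  else if PySem.Str.startswith s "SERVICE_NAME" then
    let parts := (PySem.Str.splitMax? s ":" 1).getD []   -- sep ":" ≠ "" so never none
    let name := if parts.length > 1 then PySem.Str.strip ((PySem.List.pyGet? parts 1).getD "") else ""
    (name, st.2 ++ [PvRec.service name (st.1 != "")])
  else if PySem.Str.isIn ":" s then
    let parts := (PySem.Str.splitMax? s ":" 1).getD []
    let value := if parts.length > 1 then PySem.Str.strip ((PySem.List.pyGet? parts 1).getD "") else ""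
    (st.1, st.2 ++ [PvRec.prop (PySem.Str.strip ((PySem.List.pyGet? parts 0).getD "")) value])
  else st

def pvParseRecords (lines : List String) : List PvRec :=
  (lines.foldl pvParseStep ("", [])).2

def pvRender : PvRec → String
  | PvRec.service name sep =>
      let row := "    <tr class=\"section-header\"><td colspan=\"2\"><strong>Service: " ++ pvEscape name ++ "</strong></td></tr>\n"
      if sep then "    <tr><td colspan=\"2\">&nbsp;</td></tr>\n" ++ row else row
  | PvRec.prop key value =>
      "    <tr><td style=\"padding-left: 20px;\">" ++ pvEscape key ++ "</td><td>" ++ pvEscape value ++ "</td></tr>\n"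

def parse_sc_query_table_alt (lines : List String) : String :=
  pvHeader ++ PySem.Str.join "" ((pvParseRecords lines).map pvRender) ++ pvFooter

-- ===== PRECONDITION & SPEC =====
def Spec_parse_sc_query_table (lines : List String) (out : String) : Prop := out = parse_sc_query_table_alt lines
instance (lines : List String) (out : String) : Decidable (Spec_parse_sc_query_table lines out) := by unfold Spec_parse_sc_query_table; infer_instance

-- ===== CLAIM (what is proved, stated in full; the proofs are below) =====
def Claim_equal_parse_sc_query_table : Prop := ∀ (lines : List String), Dom_parse_sc_query_table lines → Spec_parse_sc_query_table lines (parse_sc_query_table lines)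

-- ===== LEMMAS AND PROOFS =====

-- chained single-character replace unrolled: PySem.Chars.replace.go on a one-char pattern
lemma pv_go_single (ch : Char) (r : List Char) :
    ∀ (fuel : Nat) (l acc : List Char), l.length ≤ fuel →
    PySem.Chars.replace.go [ch] r fuel l acc
      = acc.reverse ++ l.flatMap (fun c => if c = ch then r else [c]) := by
  intro fuel
  induction fuel with
  | zero =>
    intro l acc h
    cases l with
    | nil => simp [PySem.Chars.replace.go]
    | cons c t => simp at h
  | succ n ih =>
    intro l acc h
    cases l with
    | nil => simp [PySem.Chars.replace.go]
    | cons c t =>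
      unfold PySem.Chars.replace.go
      by_cases hc : c = ch
      · subst hc
        have : [c].isPrefixOf (c :: t) = true := by simp [List.isPrefixOf]
        simp only [this, if_pos]
        rw [ih]
        · simp
        · simpa using Nat.le_of_succ_le_succ h
      · have : [ch].isPrefixOf (c :: t) = false := by
          simp [List.isPrefixOf]; intro h'; exact absurd h'.symm hc
        simp only [this, Bool.false_eq_true, if_neg, not_false_iff]
        rw [ih]
        · simp [hc]
        · simpa using Nat.le_of_succ_le_succ h

lemma pv_replace_single (l : List Char) (ch : Char) (r : List Char) :
    PySem.Chars.replace l [ch] r = l.flatMap (fun c => if c = ch then r else [c]) := by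
  unfold PySem.Chars.replace
  simp [pv_go_single ch r l.length l [] (le_refl _)]

-- composing the five per-character replaces on one character gives _esc_char
lemma pv_escchain (c : Char) :
    List.flatMap (fun x =>
      List.flatMap (fun x =>
        List.flatMap (fun x =>
          List.flatMap (fun x => if x = '\'' then "&#x27;".toList else [x])
            (if x = '"' then "&quot;".toList else [x]))
          (if x = '>' then "&gt;".toList else [x]))
        (if x = '<' then "&lt;".toList else [x]))
      (if c = '&' then "&amp;".toList else [c])
      = (pvEscChar c).toList := by
  by_cases h1 : c = '&'
  · subst h1; decide
  by_cases h2 : c = '<'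
  · subst h2; decide
  by_cases h3 : c = '>'
  · subst h3; decide
  by_cases h4 : c = '"'
  · subst h4; decide
  by_cases h5 : c = '\''
  · subst h5; decide
  simp [pvEscChar, h1, h2, h3, h4, h5]

lemma pv_join_map_toList (cs : List Char) :
    (PySem.Str.join "" (cs.map pvEscChar)).toList = cs.flatMap (fun c => (pvEscChar c).toList) := by
  induction cs with
  | nil => simp [PySem.Str.join, PySem.Chars.join, List.intercalate]
  | cons c t ih =>
    have : PySem.Str.join "" (pvEscChar c :: t.map pvEscChar)
        = pvEscChar c ++ PySem.Str.join "" (t.map pvEscChar) := by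
      simp only [PySem.Str.join, PySem.Chars.join, List.intercalate, List.map]
      cases t <;> simp [String.ofList_append]
    simp [this, ih]

-- A's chained-replace escape equals B's per-character escape
lemma pv_escape_eq (t : String) : escape_html t = pvEscape t := by
  apply String.toList_inj.mp
  rw [show pvEscape t = PySem.Str.join "" (t.toList.map pvEscChar) from rfl, pv_join_map_toList]
  by_cases ht : t = ""
  · subst ht; decide
  · simp only [escape_html, if_neg ht, PySem.Str.toList_replace]
    rw [show ("&" : String).toList = ['&'] from rfl, show ("<" : String).toList = ['<'] from rfl,
        show (">" : String).toList = ['>'] from rfl, show ("\"" : String).toList = ['"'] from rfl,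
        show ("'" : String).toList = ['\''] from rfl]
    rw [pv_replace_single, pv_replace_single, pv_replace_single, pv_replace_single, pv_replace_single]
    simp only [List.flatMap_assoc]
    exact List.flatMap_congr (fun c _ => pv_escchain c)

lemma pv_join_nil : PySem.Str.join "" [] = "" := by decide

lemma pv_join_cons (x : String) (l : List String) :
    PySem.Str.join "" (x :: l) = x ++ PySem.Str.join "" l := by
  simp only [PySem.Str.join, PySem.Chars.join, List.intercalate, List.map]
  cases l <;> simp [String.ofList_append]

lemma pv_join_append (a b : List String) :
    PySem.Str.join "" (a ++ b) = PySem.Str.join "" a ++ PySem.Str.join "" b := by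
  induction a with
  | nil => simp [pv_join_nil]
  | cons x t ih => simp [pv_join_cons, ih, String.append_assoc]

-- one parse step only appends to the record list
lemma pv_step_append (cur : String) (recs : List PvRec) (line : String) :
    pvParseStep (cur, recs) line
      = ((pvParseStep (cur, []) line).1, recs ++ (pvParseStep (cur, []) line).2) := by
  simp only [pvParseStep]
  split_ifs <;> simp only [List.append_nil, List.nil_append]

-- hence the whole parse fold does
lemma pvParseStep_snd_append (lines : List String) :
    ∀ (cur : String) (recs : List PvRec),
    (lines.foldl pvParseStep (cur, recs)).2 = recs ++ (lines.foldl pvParseStep (cur, [])).2 := by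
  induction lines with
  | nil => simp
  | cons line rest ih =>
    intro cur recs
    rw [List.foldl_cons, List.foldl_cons, pv_step_append]
    rw [ih _ (recs ++ (pvParseStep (cur, []) line).2), ih _ (pvParseStep (cur, []) line).2]
    simp [List.append_assoc]

-- one A step = render the records one parse step emits
lemma pv_stepA_corr (html cur line : String) :
    pvStepA (html, cur) line
      = (html ++ PySem.Str.join "" (((pvParseStep (cur, []) line).2).map pvRender),
         (pvParseStep (cur, []) line).1) := by
  simp only [pvStepA, pvParseStep, pv_escape_eq]
  split_ifs with h1 h2 h3 h4 h5 <;>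
    simp only [List.nil_append, List.map_cons, List.map_nil, pvRender, pv_join_cons, pv_join_nil,
      String.append_empty, Prod.mk.injEq, bne_iff_ne, ne_eq] <;>
    simp only [String.append_assoc, and_true] <;>
    first | rfl | (rw [if_pos h3]) | (rw [if_neg h3])

lemma pv_main (lines : List String) :
    ∀ (html cur : String),
    (lines.foldl pvStepA (html, cur)).1
      = html ++ PySem.Str.join "" (((lines.foldl pvParseStep (cur, [])).2).map pvRender) := by
  induction lines with
  | nil => simp [pv_join_nil]
  | cons line rest ih =>
    intro html cur
    rw [List.foldl_cons, List.foldl_cons, pv_stepA_corr, ih]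
    rw [show pvParseStep (cur, []) line
          = ((pvParseStep (cur, []) line).1, (pvParseStep (cur, []) line).2) from rfl]
    rw [pvParseStep_snd_append rest (pvParseStep (cur, []) line).1 (pvParseStep (cur, []) line).2]
    simp [pv_join_append, String.append_assoc]

-- ===== VERDICT (by name: the statement is the Claim_ definition above) =====
theorem parse_sc_query_table_spec : Claim_equal_parse_sc_query_table := by
  intro lines _
  unfold Spec_parse_sc_query_table parse_sc_query_table parse_sc_query_table_alt pvParseRecords pvHeader pvFooter
  dsimp only
  rw [pv_main]
  congr 1
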